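-- pv_equiv track=rewrite | github.com/AndrewByronFong/EbayML2024 | code/model/rule_based.py | replace_nicknames
-- ===== SOURCE A (Python) =====
-- def replace_nicknames(normalized_str):
--     nickename_to_fullname_normalized = {
--         'f250sd': 'f250 super duty',
--         'f350sd': 'f350 super duty',
--         'f450sd': 'f450 super duty',
--         'f550sd': 'f550 super duty',
--         'chevy': 'chevrolet',
--         'vw': 'volkswagen'
--     }
--     for nickname, fullname in nickename_to_fullname_normalized.items():
--         normalized_str = normalized_str.replace(nickname, fullname)
--     return normalized_str
-- ===== SOURCE B (Python) =====
-- def replace_nicknames(normalized_str):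
--     pairs = [
--         ('f250sd', 'f250 super duty'),
--         ('f350sd', 'f350 super duty'),
--         ('f450sd', 'f450 super duty'),
--         ('f550sd', 'f550 super duty'),
--         ('chevy', 'chevrolet'),
--         ('vw', 'volkswagen'),
--     ]
--     out = []
--     i = 0
--     n = len(normalized_str)
--     while i < n:
--         for nick, full in pairs:
--             if normalized_str.startswith(nick, i):
--                 out.append(full)
--                 i += len(nick)
--                 break
--         else:
--             out.append(normalized_str[i])
--             i += 1
--     return ''.join(out)
-- ===== Notes on version B (the rewrite author's own statement) =====
-- stated objective: alternative
-- what changed: Six sequential full-string str.replace passes are replaced by a single left-to-right scan that matches all six nicknames simultaneously at each position (valid because no full name contains a nickname and no nicknames overlap).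
import Mathlib
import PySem

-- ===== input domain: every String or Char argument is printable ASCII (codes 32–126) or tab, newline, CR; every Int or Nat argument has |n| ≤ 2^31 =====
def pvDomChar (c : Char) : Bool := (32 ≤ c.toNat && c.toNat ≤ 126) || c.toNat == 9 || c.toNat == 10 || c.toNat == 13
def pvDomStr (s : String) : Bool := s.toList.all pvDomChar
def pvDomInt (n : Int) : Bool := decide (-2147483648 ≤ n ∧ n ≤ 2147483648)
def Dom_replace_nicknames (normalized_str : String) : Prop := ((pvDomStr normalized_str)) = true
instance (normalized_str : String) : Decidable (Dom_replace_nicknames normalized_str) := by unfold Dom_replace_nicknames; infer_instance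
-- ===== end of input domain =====

-- B replaces A's six sequential full-string replace passes by one simultaneous left-to-right scan; the return values are proved equal (objective: alternative).
-- ===== PORT A =====
def replace_nicknames (normalized_str : String) : String :=
  let s1 := PySem.Str.replace normalized_str "f250sd" "f250 super duty"
  let s2 := PySem.Str.replace s1 "f350sd" "f350 super duty"
  let s3 := PySem.Str.replace s2 "f450sd" "f450 super duty"
  let s4 := PySem.Str.replace s3 "f550sd" "f550 super duty"
  let s5 := PySem.Str.replace s4 "chevy" "chevrolet"
  let s6 := PySem.Str.replace s5 "vw" "volkswagen"
  s6

-- ===== PORT B =====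
-- the six (nickname, full name) pairs of Source B, as character lists
def pvK1 : List Char := ['f','2','5','0','s','d']
def pvV1 : List Char := ['f','2','5','0',' ','s','u','p','e','r',' ','d','u','t','y']
def pvK2 : List Char := ['f','3','5','0','s','d']
def pvV2 : List Char := ['f','3','5','0',' ','s','u','p','e','r',' ','d','u','t','y']
def pvK3 : List Char := ['f','4','5','0','s','d']
def pvV3 : List Char := ['f','4','5','0',' ','s','u','p','e','r',' ','d','u','t','y']
def pvK4 : List Char := ['f','5','5','0','s','d']
def pvV4 : List Char := ['f','5','5','0',' ','s','u','p','e','r',' ','d','u','t','y']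
def pvK5 : List Char := ['c','h','e','v','y']
def pvV5 : List Char := ['c','h','e','v','r','o','l','e','t']
def pvK6 : List Char := ['v','w']
def pvV6 : List Char := ['v','o','l','k','s','w','a','g','e','n']

-- Source B's single while-loop scan: at each position the first pair whose nickname matches
-- is emitted and skipped (the inner for-loop unrolled over the six pairs), otherwise the
-- character is copied.
def pvScan : List Char → List Char
  | [] => []
  | c :: t =>
    if pvK1.isPrefixOf (c :: t) then pvV1 ++ pvScan (t.drop 5)
    else if pvK2.isPrefixOf (c :: t) then pvV2 ++ pvScan (t.drop 5)
    else if pvK3.isPrefixOf (c :: t) then pvV3 ++ pvScan (t.drop 5)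
    else if pvK4.isPrefixOf (c :: t) then pvV4 ++ pvScan (t.drop 5)
    else if pvK5.isPrefixOf (c :: t) then pvV5 ++ pvScan (t.drop 4)
    else if pvK6.isPrefixOf (c :: t) then pvV6 ++ pvScan (t.drop 1)
    else c :: pvScan t
  termination_by s => s.length
  decreasing_by all_goals (simp only [List.length_drop, List.length_cons]; omega)

def replace_nicknames_alt (normalized_str : String) : String :=
  String.ofList (pvScan normalized_str.toList)

-- ===== PRECONDITION & SPEC =====
def Spec_replace_nicknames (normalized_str : String) (out : String) : Prop := out = replace_nicknames_alt normalized_str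
instance (normalized_str : String) (out : String) : Decidable (Spec_replace_nicknames normalized_str out) := by unfold Spec_replace_nicknames; infer_instance

-- ===== CLAIM (what is proved, stated in full; the proofs are below) =====
def Claim_equal_replace_nicknames : Prop := ∀ (normalized_str : String), Dom_replace_nicknames normalized_str → Spec_replace_nicknames normalized_str (replace_nicknames normalized_str)

-- ===== LEMMAS AND PROOFS =====

-- proof-only model of one CPython str.replace pass (PySem.Chars.replace.go without fuel/accumulator)

def pvRep (old new : List Char) : List Char → List Char
  | [] => []
  | c :: t =>
    if old.isPrefixOf (c :: t) then new ++ pvRep old new (t.drop (old.length - 1))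
    else c :: pvRep old new t
  termination_by s => s.length
  decreasing_by all_goals (simp only [List.length_drop, List.length_cons]; omega)

lemma go_eq (old new : List Char) (hold : old ≠ []) :
    ∀ (fuel : Nat) (l acc : List Char), l.length ≤ fuel →
      PySem.Chars.replace.go old new fuel l acc = acc.reverse ++ pvRep old new l := by
  intro fuel
  induction fuel with
  | zero =>
    intro l acc h
    have hl : l = [] := List.eq_nil_of_length_eq_zero (Nat.le_zero.mp h)
    subst hl
    rw [PySem.Chars.replace.go.eq_def]
    simp [pvRep]
  | succ n ih =>
    intro l acc h
    match l with
    | [] => rw [PySem.Chars.replace.go.eq_def]; simp [pvRep]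
    | c :: t =>
      rw [PySem.Chars.replace.go.eq_def]
      simp only []
      have hone : 1 ≤ old.length := List.length_pos_of_ne_nil hold
      cases hp : old.isPrefixOf (c :: t) with
      | true =>
        rw [if_pos rfl, ih]
        · obtain ⟨o, orest, rfl⟩ : ∃ o orest, old = o :: orest := by
            cases old with
            | nil => exact absurd rfl hold
            | cons o orest => exact ⟨o, orest, rfl⟩
          simp only [pvRep, hp, if_pos, List.length_cons, List.drop_succ_cons,
            Nat.add_sub_cancel, List.reverse_append, List.append_assoc]
          simp
        · simp only [List.length_cons] at h
          simp only [List.length_drop, List.length_cons]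
          omega
      | false =>
        rw [if_neg (by simp), ih]
        · simp [pvRep, hp]
        · simp only [List.length_cons] at h; omega

lemma pvRep_eq_replace (old new s : List Char) (hold : old ≠ []) :
    PySem.Chars.replace s old new = pvRep old new s := by
  rw [PySem.Chars.replace]
  rw [if_neg (by simp [List.isEmpty_iff, hold])]
  rw [go_eq old new hold s.length s [] (le_refl _)]
  simp


lemma prefix_append_false (p w Y : List Char) (h1 : ¬ p <+: w) (h2 : ¬ w <+: p) :
    p.isPrefixOf (w ++ Y) = false := by
  cases hb : p.isPrefixOf (w ++ Y) with
  | false => rfl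
  | true =>
    rw [List.isPrefixOf_iff_prefix] at hb
    rcases le_total p.length w.length with hl | hl
    · exact absurd (List.prefix_of_prefix_length_le hb (List.prefix_append w Y) hl) h1
    · exact absurd (List.prefix_of_prefix_length_le (List.prefix_append w Y) hb hl) h2

lemma pvRep_cons_of_not (p v : List Char) (c : Char) (t : List Char)
    (h : p.isPrefixOf (c :: t) = false) :
    pvRep p v (c :: t) = c :: pvRep p v t := by
  simp [pvRep, h]

lemma pvRep_fire (p v : List Char) (hp : p ≠ []) (Y : List Char) :
    pvRep p v (p ++ Y) = v ++ pvRep p v Y := by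
  match p, hp with
  | c :: rest, _ =>
    have hpre : (c :: rest).isPrefixOf ((c :: rest) ++ Y) = true := by
      rw [List.isPrefixOf_iff_prefix]; exact List.prefix_append _ _
    simp only [List.cons_append] at hpre ⊢
    rw [show pvRep (c :: rest) v (c :: (rest ++ Y))
          = v ++ pvRep (c :: rest) v ((rest ++ Y).drop ((c :: rest).length - 1)) by
        simp [pvRep, hpre]]
    simp

lemma pvRep_pass (p v w : List Char)
    (hw : ∀ s' ∈ w.tails, s' ≠ [] → ¬ p <+: s' ∧ ¬ s' <+: p) :
    ∀ Y, pvRep p v (w ++ Y) = w ++ pvRep p v Y := by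
  induction w with
  | nil => intro Y; simp
  | cons a w' ih =>
    intro Y
    have hc := hw (a :: w') (by simp) (by simp)
    have hfalse : p.isPrefixOf (a :: (w' ++ Y)) = false := by
      have := prefix_append_false p (a :: w') Y hc.1 hc.2
      simpa using this
    have ihw : ∀ s' ∈ w'.tails, s' ≠ [] → ¬ p <+: s' ∧ ¬ s' <+: p := by
      intro s' hs' hne
      refine hw s' ?_ hne
      rw [List.mem_tails] at hs' ⊢
      exact hs'.trans (List.suffix_cons a w')
    simp only [List.cons_append]
    rw [pvRep_cons_of_not _ _ _ _ hfalse, ih ihw Y]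

lemma pvRep_pres (p v : List Char) (S : List (List Char))
    (hS : ∀ q ∈ S, ∀ b q', q = b :: q' → q' ∈ S)
    (hv : ∀ q ∈ S, q ≠ [] → ¬ q <+: v ∧ ¬ v <+: q) :
    ∀ (n : Nat) (u q : List Char), u.length ≤ n → q ∈ S → q.isPrefixOf u = false →
      q.isPrefixOf (pvRep p v u) = false := by
  intro n
  induction n with
  | zero =>
    intro u q hu hq h
    have hl : u = [] := List.eq_nil_of_length_eq_zero (Nat.le_zero.mp hu)
    subst hl
    simpa [pvRep] using h
  | succ n ih =>
    intro u q hu hq h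
    match u with
    | [] => simpa [pvRep] using h
    | a :: t =>
      cases hp : p.isPrefixOf (a :: t) with
      | true =>
        rw [show pvRep p v (a :: t) = v ++ pvRep p v (t.drop (p.length - 1)) by
          simp [pvRep, hp]]
        rcases q with _ | ⟨b, q'⟩
        · simp at h
        · have hq2 := hv _ hq (by simp)
          exact prefix_append_false _ _ _ hq2.1 hq2.2
      | false =>
        rw [pvRep_cons_of_not _ _ _ _ hp]
        rcases q with _ | ⟨b, q'⟩
        · simp at h
        · simp only [List.isPrefixOf] at h ⊢
          cases hba : (b == a) with
          | false => rw [Bool.false_and]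
          | true =>
            simp only [hba, Bool.true_and] at h ⊢
            have ht : t.length ≤ n := by
              simp only [List.length_cons] at hu; omega
            exact ih t q' ht (hS _ hq b q' rfl) h

lemma pvRep_pres_key (p v q u : List Char)
    (hv : ∀ s' ∈ q.tails, s' ≠ [] → ¬ s' <+: v ∧ ¬ v <+: s')
    (h : q.isPrefixOf u = false) :
    q.isPrefixOf (pvRep p v u) = false := by
  refine pvRep_pres p v q.tails ?_ ?_ u.length u q (le_refl _) (by simp) h
  · intro x hx b x' he
    subst he
    rw [List.mem_tails] at hx ⊢
    exact (List.suffix_cons b x').trans hx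
  · intro x hx hne
    exact hv x hx hne

-- A's six chained passes coincide with B's single scan
lemma chain_eq_scan : ∀ (n : Nat) (l : List Char), l.length ≤ n →
    pvRep pvK6 pvV6 (pvRep pvK5 pvV5 (pvRep pvK4 pvV4 (pvRep pvK3 pvV3 (pvRep pvK2 pvV2 (pvRep pvK1 pvV1 l))))) = pvScan l := by
  intro n
  induction n with
  | zero =>
    intro l hl
    have h0 : l = [] := List.eq_nil_of_length_eq_zero (Nat.le_zero.mp hl)
    subst h0
    simp [pvRep, pvScan]
  | succ n ih =>
    intro l hl
    by_cases h1 : pvK1.isPrefixOf l = true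
    · obtain ⟨r, rfl⟩ := List.isPrefixOf_iff_prefix.mp h1
      rw [pvRep_fire pvK1 pvV1 (by decide)]
      rw [pvRep_pass pvK2 pvV2 pvV1 (by decide)]
      rw [pvRep_pass pvK3 pvV3 pvV1 (by decide)]
      rw [pvRep_pass pvK4 pvV4 pvV1 (by decide)]
      rw [pvRep_pass pvK5 pvV5 pvV1 (by decide)]
      rw [pvRep_pass pvK6 pvV6 pvV1 (by decide)]
      have hr : r.length ≤ n := by simp [pvK1] at hl; omega
      rw [ih r hr]
      have c1 : pvK1.isPrefixOf ('f'::'2'::'5'::'0'::'s'::'d'::r) = true := by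
        rw [List.isPrefixOf_iff_prefix]; exact ⟨r, by simp [pvK1]⟩
      rw [show pvK1 ++ r = 'f'::'2'::'5'::'0'::'s'::'d'::r from by simp [pvK1]]
      rw [pvScan.eq_2]
      rw [if_pos c1]
      simp only [List.drop_succ_cons, List.drop_zero]
    ·
      by_cases h2 : pvK2.isPrefixOf l = true
      · obtain ⟨r, rfl⟩ := List.isPrefixOf_iff_prefix.mp h2
        rw [pvRep_pass pvK1 pvV1 pvK2 (by decide)]
        rw [pvRep_fire pvK2 pvV2 (by decide)]
        rw [pvRep_pass pvK3 pvV3 pvV2 (by decide)]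
        rw [pvRep_pass pvK4 pvV4 pvV2 (by decide)]
        rw [pvRep_pass pvK5 pvV5 pvV2 (by decide)]
        rw [pvRep_pass pvK6 pvV6 pvV2 (by decide)]
        have hr : r.length ≤ n := by simp [pvK2] at hl; omega
        rw [ih r hr]
        have c1 : pvK1.isPrefixOf ('f'::'3'::'5'::'0'::'s'::'d'::r) = false := by
          have := prefix_append_false pvK1 pvK2 r (by decide) (by decide)
          simpa only [pvK2, List.cons_append, List.nil_append] using this
        have c2 : pvK2.isPrefixOf ('f'::'3'::'5'::'0'::'s'::'d'::r) = true := by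
          rw [List.isPrefixOf_iff_prefix]; exact ⟨r, by simp [pvK2]⟩
        rw [show pvK2 ++ r = 'f'::'3'::'5'::'0'::'s'::'d'::r from by simp [pvK2]]
        rw [pvScan.eq_2]
        rw [if_neg (by simp [c1])]
        rw [if_pos c2]
        simp only [List.drop_succ_cons, List.drop_zero]
      ·
        by_cases h3 : pvK3.isPrefixOf l = true
        · obtain ⟨r, rfl⟩ := List.isPrefixOf_iff_prefix.mp h3
          rw [pvRep_pass pvK1 pvV1 pvK3 (by decide)]
          rw [pvRep_pass pvK2 pvV2 pvK3 (by decide)]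
          rw [pvRep_fire pvK3 pvV3 (by decide)]
          rw [pvRep_pass pvK4 pvV4 pvV3 (by decide)]
          rw [pvRep_pass pvK5 pvV5 pvV3 (by decide)]
          rw [pvRep_pass pvK6 pvV6 pvV3 (by decide)]
          have hr : r.length ≤ n := by simp [pvK3] at hl; omega
          rw [ih r hr]
          have c1 : pvK1.isPrefixOf ('f'::'4'::'5'::'0'::'s'::'d'::r) = false := by
            have := prefix_append_false pvK1 pvK3 r (by decide) (by decide)
            simpa only [pvK3, List.cons_append, List.nil_append] using this
          have c2 : pvK2.isPrefixOf ('f'::'4'::'5'::'0'::'s'::'d'::r) = false := by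
            have := prefix_append_false pvK2 pvK3 r (by decide) (by decide)
            simpa only [pvK3, List.cons_append, List.nil_append] using this
          have c3 : pvK3.isPrefixOf ('f'::'4'::'5'::'0'::'s'::'d'::r) = true := by
            rw [List.isPrefixOf_iff_prefix]; exact ⟨r, by simp [pvK3]⟩
          rw [show pvK3 ++ r = 'f'::'4'::'5'::'0'::'s'::'d'::r from by simp [pvK3]]
          rw [pvScan.eq_2]
          rw [if_neg (by simp [c1])]
          rw [if_neg (by simp [c2])]
          rw [if_pos c3]
          simp only [List.drop_succ_cons, List.drop_zero]
        ·
          by_cases h4 : pvK4.isPrefixOf l = true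
          · obtain ⟨r, rfl⟩ := List.isPrefixOf_iff_prefix.mp h4
            rw [pvRep_pass pvK1 pvV1 pvK4 (by decide)]
            rw [pvRep_pass pvK2 pvV2 pvK4 (by decide)]
            rw [pvRep_pass pvK3 pvV3 pvK4 (by decide)]
            rw [pvRep_fire pvK4 pvV4 (by decide)]
            rw [pvRep_pass pvK5 pvV5 pvV4 (by decide)]
            rw [pvRep_pass pvK6 pvV6 pvV4 (by decide)]
            have hr : r.length ≤ n := by simp [pvK4] at hl; omega
            rw [ih r hr]
            have c1 : pvK1.isPrefixOf ('f'::'5'::'5'::'0'::'s'::'d'::r) = false := by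
              have := prefix_append_false pvK1 pvK4 r (by decide) (by decide)
              simpa only [pvK4, List.cons_append, List.nil_append] using this
            have c2 : pvK2.isPrefixOf ('f'::'5'::'5'::'0'::'s'::'d'::r) = false := by
              have := prefix_append_false pvK2 pvK4 r (by decide) (by decide)
              simpa only [pvK4, List.cons_append, List.nil_append] using this
            have c3 : pvK3.isPrefixOf ('f'::'5'::'5'::'0'::'s'::'d'::r) = false := by
              have := prefix_append_false pvK3 pvK4 r (by decide) (by decide)
              simpa only [pvK4, List.cons_append, List.nil_append] using this
            have c4 : pvK4.isPrefixOf ('f'::'5'::'5'::'0'::'s'::'d'::r) = true := by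
              rw [List.isPrefixOf_iff_prefix]; exact ⟨r, by simp [pvK4]⟩
            rw [show pvK4 ++ r = 'f'::'5'::'5'::'0'::'s'::'d'::r from by simp [pvK4]]
            rw [pvScan.eq_2]
            rw [if_neg (by simp [c1])]
            rw [if_neg (by simp [c2])]
            rw [if_neg (by simp [c3])]
            rw [if_pos c4]
            simp only [List.drop_succ_cons, List.drop_zero]
          ·
            by_cases h5 : pvK5.isPrefixOf l = true
            · obtain ⟨r, rfl⟩ := List.isPrefixOf_iff_prefix.mp h5
              rw [pvRep_pass pvK1 pvV1 pvK5 (by decide)]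
              rw [pvRep_pass pvK2 pvV2 pvK5 (by decide)]
              rw [pvRep_pass pvK3 pvV3 pvK5 (by decide)]
              rw [pvRep_pass pvK4 pvV4 pvK5 (by decide)]
              rw [pvRep_fire pvK5 pvV5 (by decide)]
              rw [pvRep_pass pvK6 pvV6 pvV5 (by decide)]
              have hr : r.length ≤ n := by simp [pvK5] at hl; omega
              rw [ih r hr]
              have c1 : pvK1.isPrefixOf ('c'::'h'::'e'::'v'::'y'::r) = false := by
                have := prefix_append_false pvK1 pvK5 r (by decide) (by decide)
                simpa only [pvK5, List.cons_append, List.nil_append] using this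
              have c2 : pvK2.isPrefixOf ('c'::'h'::'e'::'v'::'y'::r) = false := by
                have := prefix_append_false pvK2 pvK5 r (by decide) (by decide)
                simpa only [pvK5, List.cons_append, List.nil_append] using this
              have c3 : pvK3.isPrefixOf ('c'::'h'::'e'::'v'::'y'::r) = false := by
                have := prefix_append_false pvK3 pvK5 r (by decide) (by decide)
                simpa only [pvK5, List.cons_append, List.nil_append] using this
              have c4 : pvK4.isPrefixOf ('c'::'h'::'e'::'v'::'y'::r) = false := by
                have := prefix_append_false pvK4 pvK5 r (by decide) (by decide)
                simpa only [pvK5, List.cons_append, List.nil_append] using this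
              have c5 : pvK5.isPrefixOf ('c'::'h'::'e'::'v'::'y'::r) = true := by
                rw [List.isPrefixOf_iff_prefix]; exact ⟨r, by simp [pvK5]⟩
              rw [show pvK5 ++ r = 'c'::'h'::'e'::'v'::'y'::r from by simp [pvK5]]
              rw [pvScan.eq_2]
              rw [if_neg (by simp [c1])]
              rw [if_neg (by simp [c2])]
              rw [if_neg (by simp [c3])]
              rw [if_neg (by simp [c4])]
              rw [if_pos c5]
              simp only [List.drop_succ_cons, List.drop_zero]
            ·
              by_cases h6 : pvK6.isPrefixOf l = true
              · obtain ⟨r, rfl⟩ := List.isPrefixOf_iff_prefix.mp h6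
                rw [pvRep_pass pvK1 pvV1 pvK6 (by decide)]
                rw [pvRep_pass pvK2 pvV2 pvK6 (by decide)]
                rw [pvRep_pass pvK3 pvV3 pvK6 (by decide)]
                rw [pvRep_pass pvK4 pvV4 pvK6 (by decide)]
                rw [pvRep_pass pvK5 pvV5 pvK6 (by decide)]
                rw [pvRep_fire pvK6 pvV6 (by decide)]
                have hr : r.length ≤ n := by simp [pvK6] at hl; omega
                rw [ih r hr]
                have c1 : pvK1.isPrefixOf ('v'::'w'::r) = false := by
                  have := prefix_append_false pvK1 pvK6 r (by decide) (by decide)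
                  simpa only [pvK6, List.cons_append, List.nil_append] using this
                have c2 : pvK2.isPrefixOf ('v'::'w'::r) = false := by
                  have := prefix_append_false pvK2 pvK6 r (by decide) (by decide)
                  simpa only [pvK6, List.cons_append, List.nil_append] using this
                have c3 : pvK3.isPrefixOf ('v'::'w'::r) = false := by
                  have := prefix_append_false pvK3 pvK6 r (by decide) (by decide)
                  simpa only [pvK6, List.cons_append, List.nil_append] using this
                have c4 : pvK4.isPrefixOf ('v'::'w'::r) = false := by
                  have := prefix_append_false pvK4 pvK6 r (by decide) (by decide)
                  simpa only [pvK6, List.cons_append, List.nil_append] using this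
                have c5 : pvK5.isPrefixOf ('v'::'w'::r) = false := by
                  have := prefix_append_false pvK5 pvK6 r (by decide) (by decide)
                  simpa only [pvK6, List.cons_append, List.nil_append] using this
                have c6 : pvK6.isPrefixOf ('v'::'w'::r) = true := by
                  rw [List.isPrefixOf_iff_prefix]; exact ⟨r, by simp [pvK6]⟩
                rw [show pvK6 ++ r = 'v'::'w'::r from by simp [pvK6]]
                rw [pvScan.eq_2]
                rw [if_neg (by simp [c1])]
                rw [if_neg (by simp [c2])]
                rw [if_neg (by simp [c3])]
                rw [if_neg (by simp [c4])]
                rw [if_neg (by simp [c5])]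
                rw [if_pos c6]
                simp only [List.drop_succ_cons, List.drop_zero]
              ·
                cases l with
                | nil => simp [pvRep, pvScan]
                | cons c t =>
                  have f1 : pvK1.isPrefixOf (c :: t) = false := Bool.eq_false_iff.mpr h1
                  have f2 : pvK2.isPrefixOf (c :: t) = false := Bool.eq_false_iff.mpr h2
                  have f3 : pvK3.isPrefixOf (c :: t) = false := Bool.eq_false_iff.mpr h3
                  have f4 : pvK4.isPrefixOf (c :: t) = false := Bool.eq_false_iff.mpr h4
                  have f5 : pvK5.isPrefixOf (c :: t) = false := Bool.eq_false_iff.mpr h5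
                  have f6 : pvK6.isPrefixOf (c :: t) = false := Bool.eq_false_iff.mpr h6
                  have e1 : pvRep pvK1 pvV1 (c :: t) = c :: pvRep pvK1 pvV1 (t) := pvRep_cons_of_not _ _ _ _ f1
                  have g1_2 : pvK2.isPrefixOf (pvRep pvK1 pvV1 (c :: t)) = false := pvRep_pres_key _ _ _ _ (by decide) f2
                  rw [e1] at g1_2
                  have g1_3 : pvK3.isPrefixOf (pvRep pvK1 pvV1 (c :: t)) = false := pvRep_pres_key _ _ _ _ (by decide) f3
                  rw [e1] at g1_3
                  have g1_4 : pvK4.isPrefixOf (pvRep pvK1 pvV1 (c :: t)) = false := pvRep_pres_key _ _ _ _ (by decide) f4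
                  rw [e1] at g1_4
                  have g1_5 : pvK5.isPrefixOf (pvRep pvK1 pvV1 (c :: t)) = false := pvRep_pres_key _ _ _ _ (by decide) f5
                  rw [e1] at g1_5
                  have g1_6 : pvK6.isPrefixOf (pvRep pvK1 pvV1 (c :: t)) = false := pvRep_pres_key _ _ _ _ (by decide) f6
                  rw [e1] at g1_6
                  have e2 : pvRep pvK2 pvV2 (c :: pvRep pvK1 pvV1 (t)) = c :: pvRep pvK2 pvV2 (pvRep pvK1 pvV1 (t)) := pvRep_cons_of_not _ _ _ _ g1_2
                  have g2_3 : pvK3.isPrefixOf (pvRep pvK2 pvV2 (c :: pvRep pvK1 pvV1 (t))) = false := pvRep_pres_key _ _ _ _ (by decide) g1_3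
                  rw [e2] at g2_3
                  have g2_4 : pvK4.isPrefixOf (pvRep pvK2 pvV2 (c :: pvRep pvK1 pvV1 (t))) = false := pvRep_pres_key _ _ _ _ (by decide) g1_4
                  rw [e2] at g2_4
                  have g2_5 : pvK5.isPrefixOf (pvRep pvK2 pvV2 (c :: pvRep pvK1 pvV1 (t))) = false := pvRep_pres_key _ _ _ _ (by decide) g1_5
                  rw [e2] at g2_5
                  have g2_6 : pvK6.isPrefixOf (pvRep pvK2 pvV2 (c :: pvRep pvK1 pvV1 (t))) = false := pvRep_pres_key _ _ _ _ (by decide) g1_6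
                  rw [e2] at g2_6
                  have e3 : pvRep pvK3 pvV3 (c :: pvRep pvK2 pvV2 (pvRep pvK1 pvV1 (t))) = c :: pvRep pvK3 pvV3 (pvRep pvK2 pvV2 (pvRep pvK1 pvV1 (t))) := pvRep_cons_of_not _ _ _ _ g2_3
                  have g3_4 : pvK4.isPrefixOf (pvRep pvK3 pvV3 (c :: pvRep pvK2 pvV2 (pvRep pvK1 pvV1 (t)))) = false := pvRep_pres_key _ _ _ _ (by decide) g2_4
                  rw [e3] at g3_4
                  have g3_5 : pvK5.isPrefixOf (pvRep pvK3 pvV3 (c :: pvRep pvK2 pvV2 (pvRep pvK1 pvV1 (t)))) = false := pvRep_pres_key _ _ _ _ (by decide) g2_5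
                  rw [e3] at g3_5
                  have g3_6 : pvK6.isPrefixOf (pvRep pvK3 pvV3 (c :: pvRep pvK2 pvV2 (pvRep pvK1 pvV1 (t)))) = false := pvRep_pres_key _ _ _ _ (by decide) g2_6
                  rw [e3] at g3_6
                  have e4 : pvRep pvK4 pvV4 (c :: pvRep pvK3 pvV3 (pvRep pvK2 pvV2 (pvRep pvK1 pvV1 (t)))) = c :: pvRep pvK4 pvV4 (pvRep pvK3 pvV3 (pvRep pvK2 pvV2 (pvRep pvK1 pvV1 (t)))) := pvRep_cons_of_not _ _ _ _ g3_4
                  have g4_5 : pvK5.isPrefixOf (pvRep pvK4 pvV4 (c :: pvRep pvK3 pvV3 (pvRep pvK2 pvV2 (pvRep pvK1 pvV1 (t))))) = false := pvRep_pres_key _ _ _ _ (by decide) g3_5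
                  rw [e4] at g4_5
                  have g4_6 : pvK6.isPrefixOf (pvRep pvK4 pvV4 (c :: pvRep pvK3 pvV3 (pvRep pvK2 pvV2 (pvRep pvK1 pvV1 (t))))) = false := pvRep_pres_key _ _ _ _ (by decide) g3_6
                  rw [e4] at g4_6
                  have e5 : pvRep pvK5 pvV5 (c :: pvRep pvK4 pvV4 (pvRep pvK3 pvV3 (pvRep pvK2 pvV2 (pvRep pvK1 pvV1 (t))))) = c :: pvRep pvK5 pvV5 (pvRep pvK4 pvV4 (pvRep pvK3 pvV3 (pvRep pvK2 pvV2 (pvRep pvK1 pvV1 (t))))) := pvRep_cons_of_not _ _ _ _ g4_5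
                  have g5_6 : pvK6.isPrefixOf (pvRep pvK5 pvV5 (c :: pvRep pvK4 pvV4 (pvRep pvK3 pvV3 (pvRep pvK2 pvV2 (pvRep pvK1 pvV1 (t)))))) = false := pvRep_pres_key _ _ _ _ (by decide) g4_6
                  rw [e5] at g5_6
                  have e6 : pvRep pvK6 pvV6 (c :: pvRep pvK5 pvV5 (pvRep pvK4 pvV4 (pvRep pvK3 pvV3 (pvRep pvK2 pvV2 (pvRep pvK1 pvV1 (t)))))) = c :: pvRep pvK6 pvV6 (pvRep pvK5 pvV5 (pvRep pvK4 pvV4 (pvRep pvK3 pvV3 (pvRep pvK2 pvV2 (pvRep pvK1 pvV1 (t)))))) := pvRep_cons_of_not _ _ _ _ g5_6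
                  rw [e1, e2, e3, e4, e5, e6, ih t (by simp at hl; omega)]
                  rw [pvScan.eq_2]
                  rw [if_neg (by simp [f1]), if_neg (by simp [f2]), if_neg (by simp [f3]), if_neg (by simp [f4]), if_neg (by simp [f5]), if_neg (by simp [f6])]

-- ===== VERDICT (by name: the statement is the Claim_ definition above) =====
theorem replace_nicknames_spec : Claim_equal_replace_nicknames := by
  unfold Claim_equal_replace_nicknames
  intro s _
  unfold Spec_replace_nicknames replace_nicknames replace_nicknames_alt
  simp only [PySem.Str.replace, String.toList_ofList]
  rw [pvRep_eq_replace _ _ _ (by decide), pvRep_eq_replace _ _ _ (by decide),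
      pvRep_eq_replace _ _ _ (by decide), pvRep_eq_replace _ _ _ (by decide),
      pvRep_eq_replace _ _ _ (by decide), pvRep_eq_replace _ _ _ (by decide)]
  rw [show "f250sd".toList = pvK1 from rfl, show "f250 super duty".toList = pvV1 from rfl,
      show "f350sd".toList = pvK2 from rfl, show "f350 super duty".toList = pvV2 from rfl,
      show "f450sd".toList = pvK3 from rfl, show "f450 super duty".toList = pvV3 from rfl,
      show "f550sd".toList = pvK4 from rfl, show "f550 super duty".toList = pvV4 from rfl,
      show "chevy".toList = pvK5 from rfl, show "chevrolet".toList = pvV5 from rfl,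
      show "vw".toList = pvK6 from rfl, show "volkswagen".toList = pvV6 from rfl]
  rw [chain_eq_scan s.toList.length s.toList (le_refl _)]
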